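-- pv_equiv track=rewrite | github.com/jurowski/energy-patent-research | scripts/analyze_patterns.py | analyze_inventor_overlap
-- ===== SOURCE A (Python) =====
-- def analyze_inventor_overlap(patents):
--     """Find inventors who appear multiple times or across categories."""
--     inventor_patents = {}
--     for p in patents:
--         inv = p.get("inventor", "")
--         if not inv:
--             continue
--         if inv not in inventor_patents:
--             inventor_patents[inv] = []
--         inventor_patents[inv].append(p)
--
--     # Inventors with multiple patents
--     multi = {k: v for k, v in inventor_patents.items() if len(v) > 1}
--     return multi
-- ===== SOURCE B (Python) =====
-- def analyze_inventor_overlap(patents):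
--     """Find inventors who appear multiple times or across categories."""
--     invs = [p.get("inventor", "") for p in patents]
--     return {k: [p for p, i in zip(patents, invs) if i == k]
--             for k in dict.fromkeys(invs)
--             if k and invs.count(k) > 1}
-- ===== Notes on version B (the rewrite author's own statement) =====
-- stated objective: simpler
-- what changed: A accumulates every inventor's group in a dict during one pass and then filters it; B dedups the inventor list to get distinct truthy inventors in first-occurrence order and, for each one appearing more than once, gathers its group by a direct scan in a single comprehension.
import Mathlib
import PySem

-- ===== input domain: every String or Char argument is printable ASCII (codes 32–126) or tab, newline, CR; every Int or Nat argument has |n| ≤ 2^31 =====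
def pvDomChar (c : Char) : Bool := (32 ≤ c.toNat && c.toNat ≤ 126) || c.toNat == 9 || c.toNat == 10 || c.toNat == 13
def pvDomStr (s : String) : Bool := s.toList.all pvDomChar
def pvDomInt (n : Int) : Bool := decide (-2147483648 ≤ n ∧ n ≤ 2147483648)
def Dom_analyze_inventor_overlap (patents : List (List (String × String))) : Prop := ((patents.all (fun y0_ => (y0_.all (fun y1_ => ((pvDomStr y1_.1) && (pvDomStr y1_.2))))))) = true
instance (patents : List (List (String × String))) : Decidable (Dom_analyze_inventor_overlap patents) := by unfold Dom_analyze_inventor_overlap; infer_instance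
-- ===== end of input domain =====

-- B replaces A's hash-accumulation pass (build every inventor's group, then filter)
-- by a dedup-then-gather comprehension: distinct truthy inventors in first-occurrence
-- order, keeping those with count > 1 and gathering each group by its own scan;
-- objective: simpler (one comprehension), not faster.

-- ===== PORT A =====
def analyze_inventor_overlap (patents : List (List (String × String))) : List (String × List (List (String × String))) :=
  let inventor_patents := patents.foldl (fun d p =>
      let inv := (PySem.Dict.mk p).getD "inventor" ""
      if inv = "" then d
      else
        let d' := if d.contains inv then d else d.insert inv ([] : List (List (String × String)))
        d'.modify inv [] (fun l => l ++ [p]))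
    PySem.Dict.empty
  inventor_patents.items.filter (fun kv => 1 < kv.2.length)

-- ===== PORT B =====
def analyze_inventor_overlap_alt (patents : List (List (String × String))) : List (String × List (List (String × String))) :=
  let invs := patents.map (fun p => (PySem.Dict.mk p).getD "inventor" "")
  ((PySem.List.dedup invs).filter (fun k => !(k == "") && decide (1 < invs.count k))).map
    (fun k => (k, ((patents.zip invs).filter (fun pi => pi.2 == k)).map (fun pi => pi.1)))

-- ===== PRECONDITION & SPEC =====
def Spec_analyze_inventor_overlap (patents : List (List (String × String))) (out : List (String × List (List (String × String)))) : Prop := out = analyze_inventor_overlap_alt patents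
instance (patents : List (List (String × String))) (out : List (String × List (List (String × String)))) : Decidable (Spec_analyze_inventor_overlap patents out) := by unfold Spec_analyze_inventor_overlap; infer_instance

-- ===== CLAIM (what is proved, stated in full; the proofs are below) =====
def Claim_equal_analyze_inventor_overlap : Prop := ∀ (patents : List (List (String × String))), Dom_analyze_inventor_overlap patents → Spec_analyze_inventor_overlap patents (analyze_inventor_overlap patents)

-- ===== LEMMAS AND PROOFS =====

-- the inventor of a patent record
def pvInvOf (p : List (String × String)) : String := (PySem.Dict.mk p).getD "inventor" ""

-- A's loop step simplifies to an unconditional modify on truthy inventors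
theorem pv_step_eq (d : PySem.Dict String (List (List (String × String)))) (p : List (String × String)) :
    (let inv := (PySem.Dict.mk p).getD "inventor" ""
     if inv = "" then d
     else
       let d' := if d.contains inv then d else d.insert inv ([] : List (List (String × String)))
       d'.modify inv [] (fun l => l ++ [p]))
    = if (!(pvInvOf p == "")) = true then d.modify (pvInvOf p) [] (fun l => l ++ [p]) else d := by
  show (if pvInvOf p = "" then d
        else (if d.contains (pvInvOf p) then d
              else d.insert (pvInvOf p) ([] : List (List (String × String)))).modify
               (pvInvOf p) [] (fun l => l ++ [p])) = _
  by_cases h : pvInvOf p = ""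
  · simp [h]
  · have hb : (!(pvInvOf p == "")) = true := by simp [h]
    rw [if_neg h, if_pos hb]
    by_cases hc : d.contains (pvInvOf p) = true
    · rw [if_pos hc]
    · have hc' : d.contains (pvInvOf p) = false := by simpa using hc
      rw [if_neg (by simp [hc'])]
      simp [PySem.Dict.modify, PySem.Dict.insert_insert_self, PySem.Dict.getD_insert_self,
        PySem.Dict.getD_of_not_contains _ _ hc']

-- Set.update commutes with filtering by a pure predicate
theorem pv_update_filter (p : String → Bool) : ∀ (xs s : List String),
    (PySem.Set.update s xs).filter p = PySem.Set.update (s.filter p) (xs.filter p) := by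
  intro xs
  induction xs with
  | nil => intro s; rfl
  | cons x xs ih =>
    intro s
    show (PySem.Set.update (PySem.Set.add s x) xs).filter p = _
    rw [ih]
    by_cases hx : p x = true
    · have hadd : (PySem.Set.add s x).filter p = PySem.Set.add (s.filter p) x := by
        have hmem : PySem.Set.contains (List.filter p s) x = PySem.Set.contains s x := by
          simp [PySem.Set.contains, List.mem_filter, hx]
        simp only [PySem.Set.add, hmem]
        by_cases hc : PySem.Set.contains s x = true
        · rw [if_pos hc, if_pos hc]
        · rw [if_neg hc, if_neg hc, List.filter_append]
          simp [hx]
      rw [hadd]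
      have : List.filter p (x :: xs) = x :: List.filter p xs := by simp [List.filter, hx]
      rw [this]
      rfl
    · have hadd : (PySem.Set.add s x).filter p = s.filter p := by
        simp only [PySem.Set.add]
        by_cases hc : PySem.Set.contains s x = true
        · rw [if_pos hc]
        · rw [if_neg hc, List.filter_append]
          simp [hx]
      rw [hadd]
      have : List.filter p (x :: xs) = List.filter p xs := by simp [List.filter, hx]
      rw [this]

theorem pv_dedup_filter (xs : List String) (p : String → Bool) :
    (PySem.List.dedup xs).filter p = PySem.List.dedup (xs.filter p) := by
  simpa [PySem.List.dedup_eq_ofList, PySem.Set.ofList, PySem.Set.update]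
    using pv_update_filter p xs []

-- gathering through zip-with-its-own-map equals a direct filter
theorem pv_zip_gather (patents : List (List (String × String))) (k : String) :
    ((patents.zip (patents.map pvInvOf)).filter (fun pi => pi.2 == k)).map (fun pi => pi.1)
      = patents.filter (fun p => pvInvOf p == k) := by
  induction patents with
  | nil => rfl
  | cons p ps ih =>
    cases hpk : (pvInvOf p == k) with
    | true => simp [List.filter, hpk, ih]
    | false => simp [List.filter, hpk, ih]

-- A's grouping loop, rewritten as a modify-loop over (inventor, patent) pairs
theorem pv_loop_eq (patents : List (List (String × String))) :
    patents.foldl (fun d p =>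
      let inv := (PySem.Dict.mk p).getD "inventor" ""
      if inv = "" then d
      else
        let d' := if d.contains inv then d else d.insert inv ([] : List (List (String × String)))
        d'.modify inv [] (fun l => l ++ [p])) PySem.Dict.empty
    = ((patents.filter (fun p => !(pvInvOf p == ""))).map (fun p => (pvInvOf p, p))).foldl
        (fun d q => d.modify q.1 [] (fun l => l ++ [q.2])) PySem.Dict.empty := by
  rw [List.foldl_map, List.foldl_filter]
  exact PySem.List.foldl_congr_mem _ _ _ _ (fun acc x _ => pv_step_eq acc x)

theorem pv_keys_eq (patents : List (List (String × String))) :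
    (((patents.filter (fun p => !(pvInvOf p == ""))).map (fun p => (pvInvOf p, p))).foldl
        (fun d q => d.modify q.1 [] (fun l => l ++ [q.2]))
        (PySem.Dict.empty : PySem.Dict String (List (List (String × String))))).keys
      = PySem.List.dedup ((patents.map pvInvOf).filter (fun s => !(s == ""))) := by
  rw [PySem.Dict.keys_foldl_modify_key, List.map_map]
  rw [show ((fun q : String × List (String × String) => q.1) ∘ fun p => (pvInvOf p, p)) = pvInvOf from rfl]
  rw [show ((patents.filter (fun p => !(pvInvOf p == ""))).map pvInvOf)
        = (patents.map pvInvOf).filter (fun s => !(s == "")) from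
      (List.filter_map (f := pvInvOf) (p := fun s => !(s == "")) (l := patents)).symm]
  rw [PySem.Dict.keys_empty, PySem.List.dedup_eq_ofList]
  rfl

theorem pv_getD_eq (patents : List (List (String × String))) (c : String) (hc : c ≠ "") :
    (((patents.filter (fun p => !(pvInvOf p == ""))).map (fun p => (pvInvOf p, p))).foldl
        (fun d q => d.modify q.1 [] (fun l => l ++ [q.2]))
        (PySem.Dict.empty : PySem.Dict String (List (List (String × String))))).getD c []
      = patents.filter (fun p => pvInvOf p == c) := by
  rw [PySem.Dict.getD_foldl_modify_append, List.filter_map, List.map_map, List.filter_filter]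
  rw [show ((fun q : String × List (String × String) => q.2) ∘ fun p => (pvInvOf p, p))
        = fun p => p from rfl]
  simp only [PySem.Dict.getD_empty, List.nil_append, List.map_id_fun', Function.comp]
  apply List.filter_congr
  intro p _
  by_cases h : pvInvOf p = c
  · simp [h, hc]
  · simp [h]

-- ===== VERDICT (by name: the statement is the Claim_ definition above) =====
theorem analyze_inventor_overlap_spec : Claim_equal_analyze_inventor_overlap := by
  intro patents _
  unfold Spec_analyze_inventor_overlap analyze_inventor_overlap analyze_inventor_overlap_alt
  show (patents.foldl (fun d p =>
      let inv := (PySem.Dict.mk p).getD "inventor" ""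
      if inv = "" then d
      else
        let d' := if d.contains inv then d else d.insert inv ([] : List (List (String × String)))
        d'.modify inv [] (fun l => l ++ [p])) PySem.Dict.empty).items.filter
          (fun kv => 1 < kv.2.length)
    = ((PySem.List.dedup (patents.map pvInvOf)).filter
          (fun k => !(k == "") && decide (1 < (patents.map pvInvOf).count k))).map
        (fun k => (k, ((patents.zip (patents.map pvInvOf)).filter (fun pi => pi.2 == k)).map
          (fun pi => pi.1)))
  rw [pv_loop_eq]
  set D := ((patents.filter (fun p => !(pvInvOf p == ""))).map (fun p => (pvInvOf p, p))).foldl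
      (fun (d : PySem.Dict String (List (List (String × String))))
           (q : String × List (String × String)) => d.modify q.1 [] (fun l => l ++ [q.2]))
      PySem.Dict.empty with hD
  have hnodup : D.keys.Nodup := by
    rw [hD]
    exact PySem.Dict.nodup_keys_foldl_modify_key _
      (fun q : String × List (String × String) => q.1) []
      (fun _ q l => l ++ [q.2]) PySem.Dict.empty (by simp)
  rw [PySem.Dict.items_eq_map_keys D hnodup [], List.filter_map]
  rw [show ((fun kv : String × List (List (String × String)) => decide (1 < kv.2.length)) ∘
        fun k => (k, D.getD k [])) = fun k => decide (1 < (D.getD k []).length) from rfl]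
  have hkeys : D.keys = (PySem.List.dedup (patents.map pvInvOf)).filter (fun s => !(s == "")) := by
    rw [hD, pv_keys_eq, pv_dedup_filter]
  have hne : ∀ k ∈ D.keys, k ≠ "" := by
    intro k hk
    rw [hkeys] at hk
    simpa using List.of_mem_filter hk
  have hgetD : ∀ k ∈ D.keys, D.getD k [] = patents.filter (fun p => pvInvOf p == k) :=
    fun k hk => hD ▸ pv_getD_eq patents k (hne k hk)
  have hcount : ∀ k ∈ D.keys,
      decide (1 < (D.getD k []).length) = decide (1 < (patents.map pvInvOf).count k) := by
    intro k hk
    rw [hgetD k hk, List.count_eq_countP, List.countP_map, List.countP_eq_length_filter]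
    rfl
  rw [List.filter_congr hcount, hkeys, List.filter_filter]
  rw [show (fun a => !(a == "") && decide (1 < (patents.map pvInvOf).count a))
        = fun k => decide (1 < (patents.map pvInvOf).count k) && !(k == "") from
      funext fun a => Bool.and_comm _ _]
  apply List.map_congr_left
  intro k hk
  have hkmem : k ∈ D.keys := by
    rw [hkeys, ← List.filter_filter] at *
    exact List.mem_of_mem_filter hk
  rw [hgetD k hkmem, pv_zip_gather]
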